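-- pv_equiv track=rewrite | github.com/MohammadIzza/PBOWEEK2 | misteriPalindoria.py | buat_half_string
-- ===== SOURCE A (Python) =====
-- def buat_half_string(count, half_str="", middle_char=""):
--     if not count:
--         return half_str, middle_char
--     char, cnt = count.popitem()
--     if cnt % 2 != 0:
--         middle_char = char
--     half_str += char * (cnt // 2)
--     return buat_half_string(count, half_str, middle_char)
-- ===== SOURCE B (Python) =====
-- def buat_half_string(count, half_str="", middle_char=""):
--     # Iterative rewrite: consumes count with popitem in the same LIFO order
--     # (mutates count to empty, like A).
--     while count:
--         char, cnt = count.popitem()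
--         if cnt % 2 != 0:
--             middle_char = char
--         half_str += char * (cnt // 2)
--     return half_str, middle_char
-- ===== Notes on version B (the rewrite author's own statement) =====
-- stated objective: simpler
-- what changed: Tail recursion replaced by a plain while-loop fold over the popped items (ported as a foldl over the reversed association list), keeping the LIFO popitem order and odd-count middle-char tracking.
import Mathlib
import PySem

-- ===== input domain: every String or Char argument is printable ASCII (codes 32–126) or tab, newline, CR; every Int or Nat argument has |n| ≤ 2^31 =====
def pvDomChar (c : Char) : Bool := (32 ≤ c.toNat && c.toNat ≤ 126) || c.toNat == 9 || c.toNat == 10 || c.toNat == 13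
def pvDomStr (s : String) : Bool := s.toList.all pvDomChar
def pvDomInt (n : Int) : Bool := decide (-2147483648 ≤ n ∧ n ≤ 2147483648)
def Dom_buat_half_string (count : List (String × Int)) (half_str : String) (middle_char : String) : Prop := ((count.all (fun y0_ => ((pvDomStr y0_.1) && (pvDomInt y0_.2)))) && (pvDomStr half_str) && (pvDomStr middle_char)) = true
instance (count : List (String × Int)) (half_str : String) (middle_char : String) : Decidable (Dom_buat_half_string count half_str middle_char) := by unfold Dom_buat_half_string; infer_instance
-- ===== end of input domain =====

-- B replaces A's tail recursion by an iterative loop over the popped items (same LIFO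
-- popitem order, same odd-count rule); objective: simpler. Both Pythons empty `count`
-- in place; the equivalence proved here is about the return value.


-- ===== PORT A =====
-- Python 'char * n' on strings: n concatenated copies, empty for n ≤ 0 (exact; PySem.List.pyRepeat is list * n).
def pvStrTimes (s : String) (n : Int) : String := String.ofList (PySem.List.pyRepeat s.toList n)

-- A: recursion; popitem = last entry of the dict (LIFO), recurse on the rest.
def buat_half_string (count : List (String × Int)) (half_str : String) (middle_char : String) : String × String :=
  match hh : count.getLast? with
  | none => (half_str, middle_char)
  | some (char, cnt) =>
    let middle_char' := if PySem.Int.mod cnt 2 ≠ 0 then char else middle_char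
    buat_half_string count.dropLast (half_str ++ pvStrTimes char (PySem.Int.floordiv cnt 2)) middle_char'
termination_by count.length
decreasing_by
  have hne : count ≠ [] := by intro e; rw [e] at hh; simp at hh
  cases count with
  | nil => exact absurd rfl hne
  | cons x xs => simp [List.dropLast]

-- ===== PORT B =====
-- B: while-loop popping the last entry = a left fold over the reversed association list.
def buat_half_string_alt (count : List (String × Int)) (half_str : String) (middle_char : String) : String × String :=
  count.reverse.foldl
    (fun acc p =>
      (acc.1 ++ pvStrTimes p.1 (PySem.Int.floordiv p.2 2),
       if PySem.Int.mod p.2 2 ≠ 0 then p.1 else acc.2))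
    (half_str, middle_char)

-- ===== PRECONDITION & SPEC =====
-- `count` is a Python dict: an association list with duplicate keys represents no dict
-- input A can receive, so Pre_ requires the keys to be pairwise distinct.
def Pre_buat_half_string (count : List (String × Int)) (half_str : String) (middle_char : String) : Prop :=
  (count.map Prod.fst).Nodup
instance (count : List (String × Int)) (half_str : String) (middle_char : String) : Decidable (Pre_buat_half_string count half_str middle_char) := by unfold Pre_buat_half_string; infer_instance

def pvWitness_buat_half_string : (List (String × Int)) × String × String := ([("a", 3), ("b", 2)], "", "")

def Spec_buat_half_string (count : List (String × Int)) (half_str : String) (middle_char : String) (out : String × String) : Prop := out = buat_half_string_alt count half_str middle_char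
instance (count : List (String × Int)) (half_str : String) (middle_char : String) (out : String × String) : Decidable (Spec_buat_half_string count half_str middle_char out) := by unfold Spec_buat_half_string; infer_instance

-- ===== CLAIM (what is proved, stated in full; the proofs are below) =====
def Claim_equal_buat_half_string : Prop := ∀ (count : List (String × Int)) (half_str : String) (middle_char : String), Dom_buat_half_string count half_str middle_char → Pre_buat_half_string count half_str middle_char → Spec_buat_half_string count half_str middle_char (buat_half_string count half_str middle_char)

-- ===== LEMMAS AND PROOFS =====
theorem buat_half_string_eq_alt (count : List (String × Int)) :
    ∀ (h m : String), buat_half_string count h m = buat_half_string_alt count h m := by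
  induction count using List.reverseRecOn with
  | nil =>
    intro h m
    rw [buat_half_string]
    simp [buat_half_string_alt]
  | append_singleton ys p ih =>
    intro h m
    rw [buat_half_string]
    simp only [List.dropLast_concat]
    split
    · rename_i heq
      rw [List.getLast?_concat] at heq
      exact absurd heq (by simp)
    · rename_i char cnt heq
      rw [List.getLast?_concat] at heq
      obtain ⟨rfl, rfl⟩ : char = p.1 ∧ cnt = p.2 := by
        cases p; injection heq with h'; cases h'; exact ⟨rfl, rfl⟩
      rw [ih]
      simp [buat_half_string_alt, List.reverse_append]

-- ===== VERDICT (by name: the statement is the Claim_ definition above) =====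
theorem buat_half_string_spec : Claim_equal_buat_half_string := by
  intro count h m _ _
  exact buat_half_string_eq_alt count h m
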